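-- pv_equiv track=rewrite | github.com/sdh98429/dj2_alg_study | PROGRAMMERS/level2/더_맵게.py | solution
-- ===== SOURCE A (Python) =====
-- def solution(scoville, K):
--     scoville.sort(reverse=True)
--
--     answer = 0
--
--     while scoville[-1] < K:
--         if len(scoville) == 1:
--             answer = -1
--             break
--         answer += 1
--         a = scoville.pop()
--         b = scoville.pop()
--         scoville.append(a + b * 2)
--         scoville.sort(reverse=True)
--
--     return answer
-- ===== SOURCE B (Python) =====
-- def solution(scoville, K):
--     # Leftist min-heap (rank, value, left, right) built once; each round pops the
--     # two smallest and pushes a + 2*b via O(log n) melds -- no sorting at all.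
--     def merge(x, y):
--         if x is None:
--             return y
--         if y is None:
--             return x
--         if y[1] < x[1]:
--             x, y = y, x
--         m = merge(x[3], y)
--         l = x[2]
--         lr = 0 if l is None else l[0]
--         mr = 0 if m is None else m[0]
--         if lr >= mr:
--             return (mr + 1, x[1], l, m)
--         else:
--             return (lr + 1, x[1], m, l)
--
--     heap = None
--     for v in scoville:
--         heap = merge(heap, (1, v, None, None))
--     count = 0
--     while heap[1] < K:
--         _, a, l, r = heap
--         rest = merge(l, r)
--         if rest is None:
--             return -1
--         _, b, l2, r2 = rest
--         heap = merge(merge(l2, r2), (1, a + 2 * b, None, None))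
--         count += 1
--     return count
-- ===== Notes on version B (the rewrite author's own statement) =====
-- stated objective: faster
-- what changed: B builds a leftist min-heap once and each round melds away the two smallest elements and melds in a+2b, instead of A's full reverse sort of the list on every iteration.
import Mathlib
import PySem

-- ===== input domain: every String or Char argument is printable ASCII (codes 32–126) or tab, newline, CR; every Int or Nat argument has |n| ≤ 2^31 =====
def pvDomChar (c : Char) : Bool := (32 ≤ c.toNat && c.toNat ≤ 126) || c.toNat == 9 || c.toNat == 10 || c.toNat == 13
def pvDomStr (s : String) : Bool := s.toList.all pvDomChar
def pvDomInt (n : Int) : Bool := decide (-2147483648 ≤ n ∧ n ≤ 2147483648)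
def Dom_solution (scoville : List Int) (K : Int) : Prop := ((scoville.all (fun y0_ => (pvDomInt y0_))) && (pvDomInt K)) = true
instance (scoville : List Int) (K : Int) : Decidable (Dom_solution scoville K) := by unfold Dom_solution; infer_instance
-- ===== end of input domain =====

-- B replaces A's full reverse sort of the list on every round with a leftist min-heap
-- built once, melding away the two smallest and melding in a+2b each round (objective: faster).
-- A sorts and pops its argument list in place; the equivalence proved here is about the RETURN value only.

-- ===== PORT A =====
-- the while loop of A: scoville is kept sorted in reverse (descending) order.
-- fuel = length of the list: each iteration shortens the list by one, so this is exact
def solutionLoop : Nat → Int → List Int → Int → Int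
  | 0, _, _, answer => answer   -- only reachable on the empty list, where Python raises IndexError
  | fuel + 1, K, scoville, answer =>
    match PySem.List.pyGet? scoville (-1) with
    | none => answer        -- Python raises IndexError here (scoville[-1] on []); excluded by Pre_solution
    | some last =>
      if last < K then
        if scoville.length = 1 then -1
        else
          match PySem.List.pop? scoville (-1) with
          | none => answer   -- unreachable: the list is nonempty
          | some r1 =>
            match PySem.List.pop? r1.2 (-1) with
            | none => answer -- unreachable: the list has ≥ 2 elements
            | some r2 =>
              solutionLoop fuel K
                (PySem.List.sorted (r2.2 ++ [r1.1 + r2.1 * 2]) (fun x => x) true) (answer + 1)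
      else answer

def solution (scoville : List Int) (K : Int) : Int :=
  let s := PySem.List.sorted scoville (fun x => x) true
  solutionLoop s.length K s 0

-- ===== PORT B =====
-- B's heap nodes: Python's tuple (rank, value, left, right); Python's None = LHeap.nil
inductive LHeap
  | nil : LHeap
  | node : Int → Int → LHeap → LHeap → LHeap
deriving DecidableEq, Repr

-- Python: 0 if h is None else h[0]
def LHeap.rank : LHeap → Int
  | .nil => 0
  | .node rk _ _ _ => rk

def LHeap.size : LHeap → Nat
  | .nil => 0
  | .node _ _ l r => l.size + r.size + 1

-- Python helper merge(x, y): meld two leftist heaps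
def lmerge : LHeap → LHeap → LHeap
  | .nil, y => y
  | .node rk1 v1 l1 r1, .nil => .node rk1 v1 l1 r1
  | .node rk1 v1 l1 r1, .node rk2 v2 l2 r2 =>
    if v2 < v1 then
      -- Python swaps x,y here so that the smaller root stays on top
      let m := lmerge r2 (.node rk1 v1 l1 r1)
      if l2.rank ≥ m.rank then .node (m.rank + 1) v2 l2 m else .node (l2.rank + 1) v2 m l2
    else
      let m := lmerge r1 (.node rk2 v2 l2 r2)
      if l1.rank ≥ m.rank then .node (m.rank + 1) v1 l1 m else .node (l1.rank + 1) v1 m l1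
termination_by x y => x.size + y.size
decreasing_by all_goals (simp only [LHeap.size]; omega)

-- the while loop of B; fuel = initial number of elements: every round removes one
-- element and the loop stops at one element at the latest, so the fuel never runs out
def altLoop : Nat → Int → LHeap → Int → Int
  | 0, _, _, c => c
  | fuel + 1, K, h, c =>
    match h with
    | .nil => c             -- Python raises TypeError here (heap[1] on None); excluded by Pre_solution
    | .node _ a l r =>
      if a < K then
        match lmerge l r with
        | .nil => -1
        | .node _ b l2 r2 =>
          altLoop fuel K (lmerge (lmerge l2 r2) (.node 1 (a + 2 * b) .nil .nil)) (c + 1)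
      else c

def solution_alt (scoville : List Int) (K : Int) : Int :=
  let heap := scoville.foldl (fun h v => lmerge h (.node 1 v .nil .nil)) .nil
  altLoop scoville.length K heap 0

-- ===== PRECONDITION & SPEC =====
-- A evaluates scoville[-1] immediately, so on the empty list it raises IndexError: excluded.
def Pre_solution (scoville : List Int) (K : Int) : Prop := scoville ≠ []
instance (scoville : List Int) (K : Int) : Decidable (Pre_solution scoville K) := by
  unfold Pre_solution; infer_instance

def pvWitness_solution : List Int × Int := ([1, 2, 3, 9, 10, 12], 7)

def Spec_solution (scoville : List Int) (K : Int) (out : Int) : Prop := out = solution_alt scoville K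
instance (scoville : List Int) (K : Int) (out : Int) : Decidable (Spec_solution scoville K out) := by
  unfold Spec_solution; infer_instance

-- ===== CLAIM (what is proved, stated in full; the proofs are below) =====
def Claim_equal_solution : Prop := ∀ (scoville : List Int) (K : Int), Dom_solution scoville K → Pre_solution scoville K → Spec_solution scoville K (solution scoville K)

-- ===== LEMMAS AND PROOFS =====

-- the multiset of values stored in a heap
def LHeap.toList : LHeap → List Int
  | .nil => []
  | .node _ v l r => v :: (l.toList ++ r.toList)

-- min-heap property: every root is ≤ everything below it
def IsHeap : LHeap → Prop
  | .nil => True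
  | .node _ v l r => (∀ x ∈ LHeap.toList l, v ≤ x) ∧ (∀ x ∈ LHeap.toList r, v ≤ x) ∧ IsHeap l ∧ IsHeap r

theorem lmerge_perm : ∀ x y : LHeap, (lmerge x y).toList.Perm (x.toList ++ y.toList) := by
  intro x y
  fun_induction lmerge x y with
  | case1 => simp [LHeap.toList]
  | case2 => simp [LHeap.toList]
  | case3 rk1 v1 l1 r1 rk2 v2 l2 r2 hlt m hr ih =>
    rw [← Multiset.coe_eq_coe] at ih ⊢
    simp only [LHeap.toList, ← Multiset.coe_add, ← Multiset.cons_coe] at ih ⊢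
    rw [ih]; simp only [← Multiset.singleton_add]; abel
  | case4 rk1 v1 l1 r1 rk2 v2 l2 r2 hlt m hr ih =>
    rw [← Multiset.coe_eq_coe] at ih ⊢
    simp only [LHeap.toList, ← Multiset.coe_add, ← Multiset.cons_coe] at ih ⊢
    rw [ih]; simp only [← Multiset.singleton_add]; abel
  | case5 rk1 v1 l1 r1 rk2 v2 l2 r2 hlt m hr ih =>
    rw [← Multiset.coe_eq_coe] at ih ⊢
    simp only [LHeap.toList, ← Multiset.coe_add, ← Multiset.cons_coe] at ih ⊢
    rw [ih]; simp only [← Multiset.singleton_add]; abel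
  | case6 rk1 v1 l1 r1 rk2 v2 l2 r2 hlt m hr ih =>
    rw [← Multiset.coe_eq_coe] at ih ⊢
    simp only [LHeap.toList, ← Multiset.coe_add, ← Multiset.cons_coe] at ih ⊢
    rw [ih]; simp only [← Multiset.singleton_add]; abel

theorem lmerge_isHeap : ∀ x y : LHeap, IsHeap x → IsHeap y → IsHeap (lmerge x y) := by
  intro x y
  fun_induction lmerge x y with
  | case1 => intro _ hy; exact hy
  | case2 => intro hx _; exact hx
  | case3 rk1 v1 l1 r1 rk2 v2 l2 r2 hlt m hr ih =>
    intro hx hy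
    simp only [IsHeap] at hx hy ⊢
    refine ⟨hy.1, ?_, hy.2.2.1, ih hy.2.2.2 hx⟩
    intro t ht
    have ht' : t ∈ r2.toList ++ (LHeap.node rk1 v1 l1 r1).toList :=
      (lmerge_perm r2 (LHeap.node rk1 v1 l1 r1)).subset ht
    rcases List.mem_append.mp ht' with h | h
    · exact hy.2.1 t h
    · simp only [LHeap.toList, List.mem_cons, List.mem_append] at h
      rcases h with rfl | h | h
      · exact le_of_lt hlt
      · exact le_trans (le_of_lt hlt) (hx.1 t h)
      · exact le_trans (le_of_lt hlt) (hx.2.1 t h)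
  | case4 rk1 v1 l1 r1 rk2 v2 l2 r2 hlt m hr ih =>
    intro hx hy
    simp only [IsHeap] at hx hy ⊢
    refine ⟨?_, hy.1, ih hy.2.2.2 hx, hy.2.2.1⟩
    intro t ht
    have ht' : t ∈ r2.toList ++ (LHeap.node rk1 v1 l1 r1).toList :=
      (lmerge_perm r2 (LHeap.node rk1 v1 l1 r1)).subset ht
    rcases List.mem_append.mp ht' with h | h
    · exact hy.2.1 t h
    · simp only [LHeap.toList, List.mem_cons, List.mem_append] at h
      rcases h with rfl | h | h
      · exact le_of_lt hlt
      · exact le_trans (le_of_lt hlt) (hx.1 t h)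
      · exact le_trans (le_of_lt hlt) (hx.2.1 t h)
  | case5 rk1 v1 l1 r1 rk2 v2 l2 r2 hlt m hr ih =>
    intro hx hy
    simp only [IsHeap] at hx hy ⊢
    refine ⟨hx.1, ?_, hx.2.2.1, ih hx.2.2.2 hy⟩
    intro t ht
    have ht' : t ∈ r1.toList ++ (LHeap.node rk2 v2 l2 r2).toList :=
      (lmerge_perm r1 (LHeap.node rk2 v2 l2 r2)).subset ht
    have hle : v1 ≤ v2 := le_of_not_gt hlt
    rcases List.mem_append.mp ht' with h | h
    · exact hx.2.1 t h
    · simp only [LHeap.toList, List.mem_cons, List.mem_append] at h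
      rcases h with rfl | h | h
      · exact hle
      · exact le_trans hle (hy.1 t h)
      · exact le_trans hle (hy.2.1 t h)
  | case6 rk1 v1 l1 r1 rk2 v2 l2 r2 hlt m hr ih =>
    intro hx hy
    simp only [IsHeap] at hx hy ⊢
    refine ⟨?_, hx.1, ih hx.2.2.2 hy, hx.2.2.1⟩
    intro t ht
    have ht' : t ∈ r1.toList ++ (LHeap.node rk2 v2 l2 r2).toList :=
      (lmerge_perm r1 (LHeap.node rk2 v2 l2 r2)).subset ht
    have hle : v1 ≤ v2 := le_of_not_gt hlt
    rcases List.mem_append.mp ht' with h | h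
    · exact hx.2.1 t h
    · simp only [LHeap.toList, List.mem_cons, List.mem_append] at h
      rcases h with rfl | h | h
      · exact hle
      · exact le_trans hle (hy.1 t h)
      · exact le_trans hle (hy.2.1 t h)

-- the root of a heap is ≤ every stored value
theorem root_min (rk v : Int) (l r : LHeap) (hh : IsHeap (.node rk v l r)) :
    ∀ x ∈ (LHeap.node rk v l r).toList, v ≤ x := by
  simp only [IsHeap] at hh
  intro x hx
  simp only [LHeap.toList, List.mem_cons, List.mem_append] at hx
  rcases hx with rfl | h | h
  · exact le_refl x
  · exact hh.1 x h
  · exact hh.2.1 x h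

-- the last element of a descending list is ≤ every element
theorem pv_last_min : ∀ (l : List Int), l.Pairwise (fun a b => b ≤ a) →
    ∀ (hne : l ≠ []) x, x ∈ l → l.getLast hne ≤ x := by
  intro l
  induction l with
  | nil => intro _ hne; exact absurd rfl hne
  | cons a t ih =>
    intro hp hne x hx
    rcases List.pairwise_cons.mp hp with ⟨ha, hpt⟩
    cases t with
    | nil =>
      simp only [List.getLast_singleton]
      rcases List.mem_singleton.mp hx with rfl
      exact le_refl x
    | cons b t' =>
      rw [List.getLast_cons (by simp : (b :: t') ≠ [])]
      rcases List.mem_cons.mp hx with rfl | hx'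
      · exact ha _ (List.getLast_mem _)
      · exact ih hpt (by simp) x hx'

-- two descending-sorted permutations of the same Int multiset are equal
theorem pv_eq_of_perm_desc (l₁ l₂ : List Int) (hp : l₁.Perm l₂)
    (h₁ : l₁.Pairwise (fun a b => b ≤ a)) (h₂ : l₂.Pairwise (fun a b => b ≤ a)) : l₁ = l₂ :=
  hp.eq_of_pairwise (fun a b _ _ hab hba => le_antisymm hba hab) h₁ h₂

-- Python's reverse sort, characterised: any descending arrangement of the multiset
theorem pv_sortedRev_eq (xs ys : List Int) (hp : ys.Perm xs)
    (hy : ys.Pairwise (fun a b => b ≤ a)) : PySem.List.sorted xs (fun x => x) true = ys :=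
  pv_eq_of_perm_desc _ _ ((PySem.List.sorted_perm xs _ true).trans hp.symm)
    (PySem.List.sorted_pairwise_rev xs _) hy

theorem pv_sortedRev_congr (xs ys : List Int) (hp : xs.Perm ys) :
    PySem.List.sorted xs (fun x => x) true = PySem.List.sorted ys (fun x => x) true :=
  pv_sortedRev_eq xs _ ((PySem.List.sorted_perm ys _ true).trans hp.symm)
    (PySem.List.sorted_pairwise_rev ys _)

-- main loop correspondence: A's loop on the descending sort of the heap's values = B's loop
theorem pv_loop_eq (K : Int) : ∀ fuel (h : LHeap) (c : Int), IsHeap h →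
    solutionLoop fuel K (PySem.List.sorted h.toList (fun x => x) true) c = altLoop fuel K h c := by
  intro fuel
  induction fuel with
  | zero => intro h c _; rfl
  | succ fuel ih =>
    intro h c hh
    cases h with
    | nil =>
      have hs : PySem.List.sorted (LHeap.toList .nil) (fun x : Int => x) true = [] := by
        rw [PySem.List.sorted_eq_nil_iff]; rfl
      rw [hs, solutionLoop]
      simp [PySem.List.pyGet?_neg_one, altLoop]
    | node rk v l r =>
      simp only [IsHeap] at hh
      have hperm : (PySem.List.sorted (LHeap.toList (.node rk v l r)) (fun x : Int => x) true).Perm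
          (v :: (l.toList ++ r.toList)) := PySem.List.sorted_perm _ _ _
      set md := PySem.List.sorted (LHeap.toList (.node rk v l r)) (fun x : Int => x) true with hmd
      have hpw : md.Pairwise (fun a b => b ≤ a) := PySem.List.sorted_pairwise_rev _ _
      have hne : md ≠ [] := by
        intro h0; have := hperm.length_eq; rw [h0] at this; simp at this
      have hlast : md.getLast hne = v := by
        refine le_antisymm (pv_last_min md hpw hne v (hperm.mem_iff.mpr (by simp))) ?_
        exact root_min rk v l r (by simp only [IsHeap]; exact hh) _
          (hperm.subset (List.getLast_mem hne))
      have hsplit : md = md.dropLast ++ [v] := by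
        conv_lhs => rw [← List.dropLast_append_getLast hne]
        rw [hlast]
      rw [solutionLoop]
      have hget : PySem.List.pyGet? md (-1) = some v := by
        rw [hsplit]; exact PySem.List.pyGet?_neg_one_append_singleton _ _
      rw [hget, altLoop]
      dsimp only
      by_cases hK : v < K
      · rw [if_pos hK, if_pos hK]
        have hlenmd : md.length = (l.toList ++ r.toList).length + 1 := by
          have := hperm.length_eq; simpa using this
        cases hlr : lmerge l r with
        | nil =>
          have hnil : l.toList ++ r.toList = [] := by
            have h1 := lmerge_perm l r
            rw [hlr] at h1
            exact (h1.symm.eq_nil)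
          rw [if_pos (by rw [hlenmd, hnil]; rfl)]
        | node rk2 b l2 r2 =>
          have hmlist : (lmerge l r).toList = b :: (l2.toList ++ r2.toList) := by
            rw [hlr]; rfl
          have hlen1 : ¬ md.length = 1 := by
            have h1 := (lmerge_perm l r).length_eq
            rw [hmlist] at h1
            simp only [List.length_cons] at h1
            omega
          rw [if_neg hlen1]
          have hpop1 : PySem.List.pop? md (-1) = some (v, md.dropLast) := by
            conv_lhs => rw [hsplit]
            exact PySem.List.pop?_last _ _
          rw [hpop1]
          dsimp only
          have hpw2 : md.dropLast.Pairwise (fun a b : Int => b ≤ a) :=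
            hpw.sublist (List.dropLast_sublist _)
          have hperm2 : md.dropLast.Perm ((lmerge l r).toList) := by
            have h1 : (md.dropLast ++ [v]).Perm (v :: (l.toList ++ r.toList)) := by
              rw [← hsplit]; exact hperm
            have h2 : (v :: md.dropLast).Perm (v :: (l.toList ++ r.toList)) :=
              (List.perm_append_singleton v md.dropLast).symm.trans h1
            exact ((List.perm_cons v).mp h2).trans (lmerge_perm l r).symm
          have hh2 : IsHeap (lmerge l r) := lmerge_isHeap l r hh.2.2.1 hh.2.2.2
          rw [hlr] at hh2
          have hne2 : md.dropLast ≠ [] := by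
            intro h0; have := hperm2.length_eq; rw [h0, hmlist] at this; simp at this
          have hlast2 : md.dropLast.getLast hne2 = b := by
            refine le_antisymm
              (pv_last_min _ hpw2 hne2 b (hperm2.mem_iff.mpr (by rw [hmlist]; simp))) ?_
            refine root_min rk2 b l2 r2 hh2 _ ?_
            have := hperm2.subset (List.getLast_mem hne2)
            rwa [hmlist] at this
          have hsplit2 : md.dropLast = md.dropLast.dropLast ++ [b] := by
            conv_lhs => rw [← List.dropLast_append_getLast hne2]
            rw [hlast2]
          have hpop2 : PySem.List.pop? md.dropLast (-1) = some (b, md.dropLast.dropLast) := by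
            conv_lhs => rw [hsplit2]
            exact PySem.List.pop?_last _ _
          rw [hpop2]
          dsimp only
          have hpermdd : md.dropLast.dropLast.Perm (l2.toList ++ r2.toList) := by
            have h1 : (md.dropLast.dropLast ++ [b]).Perm (b :: (l2.toList ++ r2.toList)) := by
              rw [← hsplit2]
              exact hmlist ▸ hperm2
            have h2 : (b :: md.dropLast.dropLast).Perm (b :: (l2.toList ++ r2.toList)) :=
              (List.perm_append_singleton b md.dropLast.dropLast).symm.trans h1
            exact (List.perm_cons b).mp h2
          have hval : v + b * 2 = v + 2 * b := by ring
          have hIsHeap2 : IsHeap (lmerge (lmerge l2 r2) (.node 1 (v + 2 * b) .nil .nil)) := by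
            simp only [IsHeap] at hh2
            refine lmerge_isHeap _ _ (lmerge_isHeap l2 r2 hh2.2.2.1 hh2.2.2.2) ?_
            simp only [IsHeap, LHeap.toList]
            exact ⟨by simp, by simp, trivial, trivial⟩
          have hpermNew : (md.dropLast.dropLast ++ [v + b * 2]).Perm
              ((lmerge (lmerge l2 r2) (.node 1 (v + 2 * b) .nil .nil)).toList) := by
            rw [hval]
            refine List.Perm.trans ?_ (lmerge_perm _ _).symm
            have hx : (LHeap.toList (.node 1 (v + 2 * b) .nil .nil)) = [v + 2 * b] := rfl
            rw [hx]
            exact (hpermdd.trans (lmerge_perm l2 r2).symm).append_right [v + 2 * b]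
          rw [pv_sortedRev_congr _ _ hpermNew]
          exact ih _ (c + 1) hIsHeap2
      · rw [if_neg hK, if_neg hK]

-- building the heap by repeated melds: heap property and stored multiset
theorem heapify_isHeap : ∀ (xs : List Int) (h0 : LHeap), IsHeap h0 →
    IsHeap (xs.foldl (fun h v => lmerge h (.node 1 v .nil .nil)) h0) := by
  intro xs
  induction xs with
  | nil => intro h0 hh; exact hh
  | cons x t ih =>
    intro h0 hh
    exact ih _ (lmerge_isHeap _ _ hh (by
      simp only [IsHeap, LHeap.toList]
      exact ⟨by simp, by simp, trivial, trivial⟩))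

theorem heapify_perm : ∀ (xs : List Int) (h0 : LHeap),
    ((xs.foldl (fun h v => lmerge h (.node 1 v .nil .nil)) h0).toList).Perm (h0.toList ++ xs) := by
  intro xs
  induction xs with
  | nil => intro h0; simp
  | cons x t ih =>
    intro h0
    refine (ih _).trans ?_
    have h1 : ((lmerge h0 (.node 1 x .nil .nil)).toList ++ t).Perm ((h0.toList ++ [x]) ++ t) :=
      (lmerge_perm h0 _).append_right t
    refine h1.trans ?_
    rw [List.append_assoc]
    rfl

-- ===== VERDICT (by name: the statement is the Claim_ definition above) =====
theorem solution_spec : Claim_equal_solution := by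
  intro scoville K _ _
  unfold Spec_solution solution solution_alt
  dsimp only
  rw [PySem.List.length_sorted]
  have hh := heapify_isHeap scoville .nil trivial
  have hp : ((scoville.foldl (fun h v => lmerge h (.node 1 v .nil .nil)) .nil).toList).Perm
      scoville := by simpa [LHeap.toList] using heapify_perm scoville .nil
  rw [pv_sortedRev_congr _ _ hp.symm]
  exact pv_loop_eq K scoville.length _ 0 hh
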